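-- pv_equiv track=rewrite | github.com/MariusS942/Exact-Solution-Approaches-Minimum-Peak-Cost-Temporally-Repeated-Flow-Problem | auxiliary_programs/k_shortest_path_new.py | compute_blocks
-- ===== SOURCE A (Python) =====
-- def compute_blocks(T: dict, path_nodes: list) -> dict:
--     """computes a dictionary with ids to sort which node is in which block; important for checking wether a path is simple or not
--
--     Args:
--         T (dict): shortest path tree
--         path_nodes (list): path given as a list of nodes
--
--     Returns:
--         dict: dictionary which sort any vertex to its block
--     """
--
--     #we need for computation the list of arcs of the path
--     path_edges = [(path_nodes[i], path_nodes[i+1]) for i in range(len(path_nodes)-1)]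
--     blocked_edges = set(path_edges)
--
--     #initialize block dictionary
--     block = {}
--
--     #current block id
--     current_block = 0
--
--     #add all nodes to the current block if it is reachable from vi and uses not an arc of the path
--     for vi in path_nodes:
--         stack = [vi]
--         while stack:
--             u = stack.pop()
--             if u in block:
--                 continue
--             block[u] = current_block
--             for w in T.get(u, []):
--                 if (w,u) in blocked_edges:
--                     continue
--                 stack.append(w)
--         current_block = current_block + 1
--     return block
-- ===== SOURCE B (Python) =====
-- def compute_blocks(T: dict, path_nodes: list) -> dict:
--     """Recursive flood-fill re-implementation: each path node's position is its
--     block id; a recursive fill assigns every node reachable without using a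
--     path arc (w,u).  Children are visited in reverse order so the result dict
--     is populated in exactly the order A's LIFO stack produces."""
--     blocked_edges = set(zip(path_nodes, path_nodes[1:]))
--     block = {}
--
--     def fill(u, b):
--         if u in block:
--             return
--         block[u] = b
--         for w in reversed(T.get(u, [])):
--             if (w, u) not in blocked_edges:
--                 fill(w, b)
--
--     for idx, vi in enumerate(path_nodes):
--         fill(vi, idx)
--     return block
-- ===== Notes on version B (the rewrite author's own statement) =====
-- stated objective: alternative
-- what changed: The explicit-stack DFS with a manually incremented block counter is replaced by a recursive flood-fill helper driven by enumerate(path_nodes) (children visited in reverse order, matching the stack's LIFO insertion order), and blocked_edges is built by zipping the path with its tail instead of an index comprehension.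
import Mathlib
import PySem

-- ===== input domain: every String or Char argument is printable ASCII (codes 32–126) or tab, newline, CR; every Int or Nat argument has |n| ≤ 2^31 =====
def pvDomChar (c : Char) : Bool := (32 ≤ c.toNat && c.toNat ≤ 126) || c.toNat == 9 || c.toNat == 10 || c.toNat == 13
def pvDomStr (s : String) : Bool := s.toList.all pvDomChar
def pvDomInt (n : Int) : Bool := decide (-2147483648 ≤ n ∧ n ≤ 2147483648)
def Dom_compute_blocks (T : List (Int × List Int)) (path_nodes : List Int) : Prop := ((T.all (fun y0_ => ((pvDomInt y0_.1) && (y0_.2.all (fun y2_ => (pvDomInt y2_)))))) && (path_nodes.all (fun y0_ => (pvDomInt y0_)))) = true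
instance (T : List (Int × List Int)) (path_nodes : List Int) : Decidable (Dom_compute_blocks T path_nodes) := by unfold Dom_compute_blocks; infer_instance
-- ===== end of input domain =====

-- B replaces A's explicit-stack DFS and manual block counter by a recursive flood-fill
-- driven by enumerate (children visited in reverse order, matching the LIFO stack's
-- insertion order); objective: alternative decomposition, same asymptotic cost.


-- ===== PORT A =====
-- termination measure shared by both ports' traversals: number of still-unassigned
-- nodes of the finite universe U
def pvCnt (U : List Int) (d : PySem.Dict Int Int) : Nat :=
  (U.filter (fun x => !(d.contains x))).length

-- needed by the ports' `decreasing_by`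
lemma pvCnt_insert_lt (U : List Int) (d : PySem.Dict Int Int) (u v : Int)
    (hu : u ∈ U) (hc : d.contains u = false) :
    pvCnt U (d.insert u v) < pvCnt U d := by
  unfold pvCnt
  obtain ⟨s, t, rfl⟩ := List.append_of_mem hu
  have mono : ∀ (l : List Int),
      (l.filter (fun x => !((d.insert u v).contains x))).length
        ≤ (l.filter (fun x => !(d.contains x))).length := by
    intro l
    rw [← List.countP_eq_length_filter, ← List.countP_eq_length_filter]
    apply List.countP_mono_left
    intro x _ hx
    simp only [PySem.Dict.contains_insert, Bool.not_or, Bool.and_eq_true] at hx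
    exact hx.2
  rw [List.filter_append, List.filter_append,
    List.filter_cons_of_neg (p := fun x => !((d.insert u v).contains x))
      (by simp),
    List.filter_cons_of_pos (p := fun x => !(d.contains x)) (by simp [hc])]
  simp only [List.length_append, List.length_cons]
  have := mono s; have := mono t
  omega

-- every value pushed on the stack comes from a value list of T (needed to feed hT)
lemma pvMemFlatten (T : List (Int × List Int)) (u x : Int)
    (hx : x ∈ (PySem.Dict.mk T).getD u []) : x ∈ (T.map Prod.snd).flatten := by
  induction T with
  | nil => simp [PySem.Dict.getD_eq_get?_getD, PySem.Dict.get?] at hx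
  | cons p rest ih =>
    obtain ⟨k, v⟩ := p
    rw [PySem.Dict.getD_eq_get?_getD, PySem.Dict.get?_mk_cons] at hx
    by_cases hk : (k == u) = true
    · simp only [hk, if_true, Option.getD_some] at hx
      exact List.mem_flatten.2 ⟨v, by simp, hx⟩
    · simp only [hk, Bool.false_eq_true, if_false] at hx
      have hm := ih (by rw [PySem.Dict.getD_eq_get?_getD]; exact hx)
      simp only [List.map_cons, List.flatten_cons, List.mem_append]
      exact Or.inr hm

-- the inner `while stack:` loop of A (stack head = top; LIFO pop/append)
def pvLoopA (T : List (Int × List Int)) (blocked : PySem.Set (Int × Int)) (U : List Int)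
    (hT : ∀ u x, x ∈ (PySem.Dict.mk T).getD u [] → x ∈ U)
    (block : PySem.Dict Int Int) (cb : Int) (stack : List Int)
    (h : ∀ x ∈ stack, x ∈ U) : PySem.Dict Int Int :=
  match stack with
  | [] => block
  | u :: rest =>
    if hc : block.contains u then
      pvLoopA T blocked U hT block cb rest (fun x hx => h x (List.mem_cons_of_mem _ hx))
    else
      pvLoopA T blocked U hT (block.insert u cb) cb
        ((((PySem.Dict.mk T).getD u []).filter
            (fun w => !(PySem.Set.contains blocked (w, u)))).reverse ++ rest)
        (fun x hx => by
          rcases List.mem_append.1 hx with hx | hx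
          · exact hT u x (List.mem_of_mem_filter (List.mem_reverse.1 hx))
          · exact h x (List.mem_cons_of_mem _ hx))
  termination_by (pvCnt U block, stack.length)
  decreasing_by
    · exact Prod.Lex.right _ (Nat.lt_succ_self _)
    · exact Prod.Lex.left _ _
        (pvCnt_insert_lt U block u cb (h u (List.mem_cons_self)) (by simpa using hc))

-- the outer `for vi in path_nodes:` loop of A, with the manual counter current_block
def pvOuterA (T : List (Int × List Int)) (blocked : PySem.Set (Int × Int)) (U : List Int)
    (hT : ∀ u x, x ∈ (PySem.Dict.mk T).getD u [] → x ∈ U)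
    (block : PySem.Dict Int Int) (cb : Int) (pns : List Int)
    (h : ∀ x ∈ pns, x ∈ U) : PySem.Dict Int Int :=
  match pns with
  | [] => block
  | vi :: rest =>
    pvOuterA T blocked U hT
      (pvLoopA T blocked U hT block cb [vi]
        (fun x hx => h x (List.mem_cons.2 (Or.inl (List.mem_singleton.1 hx)))))
      (cb + 1) rest (fun x hx => h x (List.mem_cons_of_mem _ hx))

-- port of A; the indices i and i+1 in the path_edges comprehension are always in
-- range (i ∈ range(len-1)), so the total pyGetD form is exact
def compute_blocks (T : List (Int × List Int)) (path_nodes : List Int) : List (Int × Int) :=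
  (pvOuterA T
    (PySem.Set.ofList ((PySem.List.pyRange 0 ((path_nodes.length : Int) - 1)).map
      (fun i => (PySem.List.pyGetD path_nodes i 0, PySem.List.pyGetD path_nodes (i + 1) 0))))
    (path_nodes ++ (T.map Prod.snd).flatten)
    (fun u x hx => List.mem_append_right _ (pvMemFlatten T u x hx))
    PySem.Dict.empty 0 path_nodes
    (fun x hx => List.mem_append_left _ hx)).items

-- ===== PORT B =====
-- recursive flood-fill `fill`; the list parameter is the pending `for w in reversed(...)`
-- iteration, the subtype records that fill only adds keys (for termination only)
def pvFillB (T : List (Int × List Int)) (blocked : PySem.Set (Int × Int)) (U : List Int)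
    (hT : ∀ u x, x ∈ (PySem.Dict.mk T).getD u [] → x ∈ U)
    (b : Int) (block : PySem.Dict Int Int) (todo : List Int)
    (h : ∀ x ∈ todo, x ∈ U) : {d : PySem.Dict Int Int // pvCnt U d ≤ pvCnt U block} :=
  match todo with
  | [] => ⟨block, le_rfl⟩
  | u :: rest =>
    if hc : block.contains u then
      let r := pvFillB T blocked U hT b block rest (fun x hx => h x (List.mem_cons_of_mem _ hx))
      ⟨r.1, r.2⟩
    else
      let inner := pvFillB T blocked U hT b (block.insert u b)
        ((((PySem.Dict.mk T).getD u []).reverse).filter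
          (fun w => !(PySem.Set.contains blocked (w, u))))
        (fun x hx => hT u x (List.mem_reverse.1 (List.mem_of_mem_filter hx)))
      let outer := pvFillB T blocked U hT b inner.1 rest
        (fun x hx => h x (List.mem_cons_of_mem _ hx))
      ⟨outer.1, le_trans outer.2 (le_trans inner.2 (le_of_lt
        (pvCnt_insert_lt U block u b (h u (List.mem_cons_self)) (by simpa using hc))))⟩
  termination_by (pvCnt U block, todo.length)
  decreasing_by
    · exact Prod.Lex.right _ (Nat.lt_succ_self _)
    · exact Prod.Lex.left _ _
        (pvCnt_insert_lt U block u b (h u (List.mem_cons_self)) (by simpa using hc))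
    · exact Prod.Lex.left _ _ (lt_of_le_of_lt inner.2
        (pvCnt_insert_lt U block u b (h u (List.mem_cons_self)) (by simpa using hc)))

-- the outer `for idx, vi in enumerate(path_nodes):` loop of B
def pvOuterB (T : List (Int × List Int)) (blocked : PySem.Set (Int × Int)) (U : List Int)
    (hT : ∀ u x, x ∈ (PySem.Dict.mk T).getD u [] → x ∈ U)
    (block : PySem.Dict Int Int) (pairs : List (Int × Int))
    (h : ∀ p ∈ pairs, p.2 ∈ U) : PySem.Dict Int Int :=
  match pairs with
  | [] => block
  | p :: rest =>
    pvOuterB T blocked U hT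
      (pvFillB T blocked U hT p.1 block [p.2]
        (fun x hx => by rw [List.mem_singleton] at hx; subst hx; exact h p (List.mem_cons_self))).1
      rest (fun q hq => h q (List.mem_cons_of_mem _ hq))

def compute_blocks_alt (T : List (Int × List Int)) (path_nodes : List Int) : List (Int × Int) :=
  (pvOuterB T
    (PySem.Set.ofList (path_nodes.zip path_nodes.tail))
    (path_nodes ++ (T.map Prod.snd).flatten)
    (fun u x hx => List.mem_append_right _ (pvMemFlatten T u x hx))
    PySem.Dict.empty (PySem.List.enumerate path_nodes 0)
    (fun p hp => by
      obtain ⟨k, hk, rfl⟩ := (PySem.List.mem_enumerate_iff _ _ _).1 hp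
      exact List.mem_append_left _ (path_nodes.getElem_mem hk))).items

-- ===== PRECONDITION & SPEC =====
def Spec_compute_blocks (T : List (Int × List Int)) (path_nodes : List Int) (out : List (Int × Int)) : Prop := out = compute_blocks_alt T path_nodes
instance (T : List (Int × List Int)) (path_nodes : List Int) (out : List (Int × Int)) : Decidable (Spec_compute_blocks T path_nodes out) := by unfold Spec_compute_blocks; infer_instance

-- ===== CLAIM (what is proved, stated in full; the proofs are below) =====
def Claim_equal_compute_blocks : Prop := ∀ (T : List (Int × List Int)) (path_nodes : List Int), Dom_compute_blocks T path_nodes → Spec_compute_blocks T path_nodes (compute_blocks T path_nodes)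

-- ===== LEMMAS AND PROOFS =====

lemma pvContains_of_pvCnt_zero (U : List Int) (d : PySem.Dict Int Int) (x : Int)
    (h0 : pvCnt U d = 0) (hx : x ∈ U) : d.contains x = true := by
  unfold pvCnt at h0
  rw [List.length_eq_zero_iff, List.filter_eq_nil_iff] at h0
  simpa using h0 x hx

lemma pvLoopA_congr (T : List (Int × List Int)) (blocked : PySem.Set (Int × Int)) (U : List Int)
    (hT : ∀ u x, x ∈ (PySem.Dict.mk T).getD u [] → x ∈ U)
    (block : PySem.Dict Int Int) (cb : Int) {s s' : List Int} (hs : s = s')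
    (h : ∀ x ∈ s, x ∈ U) :
    pvLoopA T blocked U hT block cb s h = pvLoopA T blocked U hT block cb s' (hs ▸ h) := by
  subst hs; rfl

lemma pvLoopA_nil (T : List (Int × List Int)) (blocked : PySem.Set (Int × Int)) (U : List Int)
    (hT : ∀ u x, x ∈ (PySem.Dict.mk T).getD u [] → x ∈ U)
    (block : PySem.Dict Int Int) (cb : Int) (h : ∀ x ∈ ([] : List Int), x ∈ U) :
    pvLoopA T blocked U hT block cb [] h = block := by
  rw [pvLoopA]

lemma pvLoopA_cons_skip (T : List (Int × List Int)) (blocked : PySem.Set (Int × Int)) (U : List Int)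
    (hT : ∀ u x, x ∈ (PySem.Dict.mk T).getD u [] → x ∈ U)
    (block : PySem.Dict Int Int) (cb u : Int) (rest : List Int)
    (h : ∀ x ∈ u :: rest, x ∈ U) (hc : block.contains u = true) :
    pvLoopA T blocked U hT block cb (u :: rest) h
      = pvLoopA T blocked U hT block cb rest (fun x hx => h x (List.mem_cons_of_mem _ hx)) := by
  rw [pvLoopA]
  rw [dif_pos hc]

lemma pvLoopA_cons_new (T : List (Int × List Int)) (blocked : PySem.Set (Int × Int)) (U : List Int)
    (hT : ∀ u x, x ∈ (PySem.Dict.mk T).getD u [] → x ∈ U)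
    (block : PySem.Dict Int Int) (cb u : Int) (rest : List Int)
    (h : ∀ x ∈ u :: rest, x ∈ U) (hc : block.contains u = false) :
    pvLoopA T blocked U hT block cb (u :: rest) h
      = pvLoopA T blocked U hT (block.insert u cb) cb
          ((((PySem.Dict.mk T).getD u []).reverse.filter
              (fun w => !(PySem.Set.contains blocked (w, u)))) ++ rest)
          (fun x hx => by
            rcases List.mem_append.1 hx with hx | hx
            · exact hT u x (List.mem_reverse.1 (List.mem_of_mem_filter hx))
            · exact h x (List.mem_cons_of_mem _ hx)) := by
  rw [pvLoopA]
  rw [dif_neg (by simp [hc])]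
  exact pvLoopA_congr T blocked U hT _ cb (by rw [List.filter_reverse]) _

lemma pvFillB_nil (T : List (Int × List Int)) (blocked : PySem.Set (Int × Int)) (U : List Int)
    (hT : ∀ u x, x ∈ (PySem.Dict.mk T).getD u [] → x ∈ U)
    (b : Int) (block : PySem.Dict Int Int) (h : ∀ x ∈ ([] : List Int), x ∈ U) :
    (pvFillB T blocked U hT b block [] h).1 = block := by
  rw [pvFillB]

lemma pvFillB_cons_skip (T : List (Int × List Int)) (blocked : PySem.Set (Int × Int)) (U : List Int)
    (hT : ∀ u x, x ∈ (PySem.Dict.mk T).getD u [] → x ∈ U)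
    (b : Int) (block : PySem.Dict Int Int) (u : Int) (rest : List Int)
    (h : ∀ x ∈ u :: rest, x ∈ U) (hc : block.contains u = true) :
    (pvFillB T blocked U hT b block (u :: rest) h).1
      = (pvFillB T blocked U hT b block rest (fun x hx => h x (List.mem_cons_of_mem _ hx))).1 := by
  rw [pvFillB]
  rw [dif_pos hc]

lemma pvFillB_cons_new (T : List (Int × List Int)) (blocked : PySem.Set (Int × Int)) (U : List Int)
    (hT : ∀ u x, x ∈ (PySem.Dict.mk T).getD u [] → x ∈ U)
    (b : Int) (block : PySem.Dict Int Int) (u : Int) (rest : List Int)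
    (h : ∀ x ∈ u :: rest, x ∈ U) (hc : block.contains u = false) :
    (pvFillB T blocked U hT b block (u :: rest) h).1
      = (pvFillB T blocked U hT b
          (pvFillB T blocked U hT b (block.insert u b)
            ((((PySem.Dict.mk T).getD u []).reverse).filter
              (fun w => !(PySem.Set.contains blocked (w, u))))
            (fun x hx => hT u x (List.mem_reverse.1 (List.mem_of_mem_filter hx)))).1
          rest (fun x hx => h x (List.mem_cons_of_mem _ hx))).1 := by
  rw [pvFillB]
  rw [dif_neg (by simp [hc])]

lemma pvOuterA_cons (T : List (Int × List Int)) (blocked : PySem.Set (Int × Int)) (U : List Int)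
    (hT : ∀ u x, x ∈ (PySem.Dict.mk T).getD u [] → x ∈ U)
    (block : PySem.Dict Int Int) (cb vi : Int) (rest : List Int)
    (h : ∀ x ∈ vi :: rest, x ∈ U) :
    pvOuterA T blocked U hT block cb (vi :: rest) h
      = pvOuterA T blocked U hT
          (pvLoopA T blocked U hT block cb [vi]
            (fun x hx => h x (List.mem_cons.2 (Or.inl (List.mem_singleton.1 hx)))))
          (cb + 1) rest (fun x hx => h x (List.mem_cons_of_mem _ hx)) := rfl

lemma pvOuterB_cons (T : List (Int × List Int)) (blocked : PySem.Set (Int × Int)) (U : List Int)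
    (hT : ∀ u x, x ∈ (PySem.Dict.mk T).getD u [] → x ∈ U)
    (block : PySem.Dict Int Int) (p : Int × Int) (rest : List (Int × Int))
    (h : ∀ q ∈ p :: rest, q.2 ∈ U) :
    pvOuterB T blocked U hT block (p :: rest) h
      = pvOuterB T blocked U hT
          (pvFillB T blocked U hT p.1 block [p.2]
            (fun x hx => by rw [List.mem_singleton] at hx; subst hx; exact h p (List.mem_cons_self))).1
          rest (fun q hq => h q (List.mem_cons_of_mem _ hq)) := rfl

lemma pvLoopA_append (T : List (Int × List Int)) (blocked : PySem.Set (Int × Int)) (U : List Int)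
    (hT : ∀ u x, x ∈ (PySem.Dict.mk T).getD u [] → x ∈ U) (cb : Int) :
    ∀ (n : Nat) (block : PySem.Dict Int Int), pvCnt U block ≤ n →
    ∀ (s1 s2 : List Int) (h : ∀ x ∈ s1 ++ s2, x ∈ U) (h1 : ∀ x ∈ s1, x ∈ U) (h2 : ∀ x ∈ s2, x ∈ U),
    pvLoopA T blocked U hT block cb (s1 ++ s2) h
      = pvLoopA T blocked U hT (pvLoopA T blocked U hT block cb s1 h1) cb s2 h2 := by
  intro n
  induction n with
  | zero =>
    intro block hb s1 s2 h h1 h2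
    induction s1 generalizing block with
    | nil => rw [pvLoopA_nil]; rfl
    | cons u t iht =>
      have hcu : block.contains u = true :=
        pvContains_of_pvCnt_zero U block u (Nat.le_zero.1 hb) (h1 u List.mem_cons_self)
      rw [pvLoopA_congr T blocked U hT block cb (List.cons_append : (u :: t) ++ s2 = u :: (t ++ s2)) h,
        pvLoopA_cons_skip T blocked U hT block cb u (t ++ s2) _ hcu,
        pvLoopA_cons_skip T blocked U hT block cb u t h1 hcu]
      exact iht block hb _ _
  | succ n ihn =>
    intro block hb s1 s2 h h1 h2
    induction s1 generalizing block with
    | nil => rw [pvLoopA_nil]; rfl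
    | cons u t iht =>
      by_cases hcu : block.contains u = true
      · rw [pvLoopA_congr T blocked U hT block cb (List.cons_append : (u :: t) ++ s2 = u :: (t ++ s2)) h,
          pvLoopA_cons_skip T blocked U hT block cb u (t ++ s2) _ hcu,
          pvLoopA_cons_skip T blocked U hT block cb u t h1 hcu]
        exact iht block hb _ _
      · have hcu' : block.contains u = false := by simpa using hcu
        have hlt := pvCnt_insert_lt U block u cb (h1 u List.mem_cons_self) hcu'
        have hb' : pvCnt U (block.insert u cb) ≤ n := by omega
        rw [pvLoopA_congr T blocked U hT block cb (List.cons_append : (u :: t) ++ s2 = u :: (t ++ s2)) h,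
          pvLoopA_cons_new T blocked U hT block cb u (t ++ s2) _ hcu',
          pvLoopA_cons_new T blocked U hT block cb u t h1 hcu',
          pvLoopA_congr T blocked U hT (block.insert u cb) cb
            (List.append_assoc _ t s2).symm _]
        exact ihn (block.insert u cb) hb' _ s2 _ _ _

lemma pvFillB_eq_pvLoopA (T : List (Int × List Int)) (blocked : PySem.Set (Int × Int)) (U : List Int)
    (hT : ∀ u x, x ∈ (PySem.Dict.mk T).getD u [] → x ∈ U) (b : Int) :
    ∀ (n : Nat) (block : PySem.Dict Int Int), pvCnt U block ≤ n →
    ∀ (todo : List Int) (h : ∀ x ∈ todo, x ∈ U),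
    (pvFillB T blocked U hT b block todo h).1 = pvLoopA T blocked U hT block b todo h := by
  intro n
  induction n with
  | zero =>
    intro block hb todo h
    induction todo generalizing block with
    | nil => rw [pvFillB_nil, pvLoopA_nil]
    | cons u rest iht =>
      have hcu : block.contains u = true :=
        pvContains_of_pvCnt_zero U block u (Nat.le_zero.1 hb) (h u List.mem_cons_self)
      rw [pvFillB_cons_skip T blocked U hT b block u rest h hcu,
        pvLoopA_cons_skip T blocked U hT block b u rest h hcu]
      exact iht block hb _
  | succ n ihn =>
    intro block hb todo h
    induction todo generalizing block with
    | nil => rw [pvFillB_nil, pvLoopA_nil]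
    | cons u rest iht =>
      by_cases hcu : block.contains u = true
      · rw [pvFillB_cons_skip T blocked U hT b block u rest h hcu,
          pvLoopA_cons_skip T blocked U hT block b u rest h hcu]
        exact iht block hb _
      · have hcu' : block.contains u = false := by simpa using hcu
        have hlt := pvCnt_insert_lt U block u b (h u List.mem_cons_self) hcu'
        have hb' : pvCnt U (block.insert u b) ≤ n := by omega
        have mono : ∀ (todo' : List Int) (h' : ∀ x ∈ todo', x ∈ U),
            pvCnt U (pvLoopA T blocked U hT (block.insert u b) b todo' h') ≤ pvCnt U (block.insert u b) := by
          intro todo' h'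
          rw [← ihn (block.insert u b) hb' todo' h']
          exact (pvFillB T blocked U hT b (block.insert u b) todo' h').2
        rw [pvFillB_cons_new T blocked U hT b block u rest h hcu',
          pvLoopA_cons_new T blocked U hT block b u rest h hcu',
          ihn (block.insert u b) hb',
          pvLoopA_append T blocked U hT b (pvCnt U (block.insert u b)) (block.insert u b) le_rfl _ rest _ _ _]
        exact ihn _ (le_trans (mono _ _) hb') rest _

lemma pvOuterA_eq_pvOuterB (T : List (Int × List Int)) (blocked : PySem.Set (Int × Int)) (U : List Int)
    (hT : ∀ u x, x ∈ (PySem.Dict.mk T).getD u [] → x ∈ U) :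
    ∀ (pns : List Int) (cb : Int) (block : PySem.Dict Int Int)
      (hA : ∀ x ∈ pns, x ∈ U) (pairs : List (Int × Int))
      (hp : pairs = PySem.List.enumerate pns cb) (hB : ∀ p ∈ pairs, p.2 ∈ U),
    pvOuterA T blocked U hT block cb pns hA = pvOuterB T blocked U hT block pairs hB := by
  intro pns
  induction pns with
  | nil =>
    intro cb block hA pairs hp hB
    rw [PySem.List.enumerate_nil] at hp
    subst hp
    rfl
  | cons vi rest ih =>
    intro cb block hA pairs hp hB
    rw [PySem.List.enumerate_cons] at hp
    subst hp
    rw [pvOuterA_cons, pvOuterB_cons,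
      pvFillB_eq_pvLoopA T blocked U hT cb (pvCnt U block) block le_rfl [vi] _]
    exact ih (cb + 1) _ _ _ rfl _

lemma pvEdges_eq (l : List Int) :
    (PySem.List.pyRange 0 ((l.length : Int) - 1)).map
      (fun i => (PySem.List.pyGetD l i 0, PySem.List.pyGetD l (i + 1) 0)) = l.zip l.tail := by
  cases l with
  | nil => decide
  | cons a m =>
    have hlen : ((a :: m).length : Int) - 1 = (m.length : Int) := by
      simp
    rw [hlen, PySem.List.pyRange_zero_natCast, List.map_map]
    have key : ∀ (x : Int) (m' : List Int),
        (List.range m'.length).map (fun k => ((x :: m').getD k 0, (x :: m').getD (k + 1) 0))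
          = (x :: m').zip m' := by
      intro x m'
      induction m' generalizing x with
      | nil => rfl
      | cons b t ihb =>
        rw [show (x :: b :: t).zip (b :: t) = (x, b) :: ((b :: t).zip t) from rfl]
        simp only [List.length_cons, List.range_succ_eq_map, List.map_cons, List.map_map]
        refine congrArg₂ _ rfl ?_
        rw [← ihb b]
        apply List.map_congr_left
        intro k hk
        simp [Nat.succ_eq_add_one, List.getD_cons_succ]
    rw [List.tail_cons, ← key a m]
    apply List.map_congr_left
    intro k hk
    have h2 : ((k : Int) + 1) = ((k + 1 : Nat) : Int) := by push_cast; ring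
    simp only [Function.comp_apply, h2, PySem.List.pyGetD_natCast]

-- ===== VERDICT (by name: the statement is the Claim_ definition above) =====
theorem compute_blocks_spec : Claim_equal_compute_blocks := by
  intro T path_nodes _
  unfold Spec_compute_blocks compute_blocks compute_blocks_alt
  rw [pvEdges_eq]
  congr 1
  exact pvOuterA_eq_pvOuterB T _ _ _ path_nodes 0 PySem.Dict.empty _ _ rfl _
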